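-- pv_equiv track=rewrite | github.com/Cardinal-Fang-78/thn-cli | thn_cli/diagnostics/indent_extended.py | _calc_indent_depth
-- ===== SOURCE A (Python) =====
-- def _calc_indent_depth(line: str) -> int:
--     """
--     Count leading spaces. Tabs count as 4 spaces for diagnostic purposes.
--     """
--     depth = 0
--     for ch in line:
--         if ch == " ":
--             depth += 1
--         elif ch == "\t":
--             depth += 4
--         else:
--             break
--     return depth
-- ===== SOURCE B (Python) =====
-- def _calc_indent_depth(line: str) -> int:
--     prefix = line[:len(line) - len(line.lstrip(" \t"))]
--     return prefix.count(" ") + 4 * prefix.count("\t")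
-- ===== Notes on version B (the rewrite author's own statement) =====
-- stated objective: simpler
-- what changed: Replaced the accumulating for-loop with break by computing the leading space/tab prefix via one lstrip-based slice and summing two count() passes over that prefix.
import Mathlib
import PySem

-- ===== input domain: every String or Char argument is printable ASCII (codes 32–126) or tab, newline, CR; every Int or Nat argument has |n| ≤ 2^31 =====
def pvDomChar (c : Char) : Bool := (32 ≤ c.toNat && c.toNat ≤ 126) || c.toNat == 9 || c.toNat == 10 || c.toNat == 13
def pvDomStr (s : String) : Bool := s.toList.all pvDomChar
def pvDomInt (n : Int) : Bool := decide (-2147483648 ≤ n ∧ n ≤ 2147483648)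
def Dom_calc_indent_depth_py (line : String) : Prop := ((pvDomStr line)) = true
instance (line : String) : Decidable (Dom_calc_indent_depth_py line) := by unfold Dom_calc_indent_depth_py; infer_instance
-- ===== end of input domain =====

-- B replaces A's accumulating break-loop by a slice that isolates the leading
-- space/tab prefix (via lstrip) followed by two counting passes (objective: simpler).


-- ===== PORT A =====
-- the for-loop with break: structural recursion over the characters, carrying depth
def calcIndentLoop : List Char → Int → Int
  | [], depth => depth
  | ch :: rest, depth =>
      if ch = ' ' then calcIndentLoop rest (depth + 1)
      else if ch = '\t' then calcIndentLoop rest (depth + 4)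
      else depth

def calc_indent_depth_py (line : String) : Int :=
  calcIndentLoop line.toList 0

-- ===== PORT B =====
-- line.lstrip(" \t"): drop leading spaces/tabs (ported by hand; exact for lstrip with
-- an explicit chars argument, which PySem's lstrip — whitespace-only — does not cover)
def lstripSpTab (cs : List Char) : List Char :=
  cs.dropWhile (fun c => c == ' ' || c == '\t')

def calc_indent_depth_py_alt (line : String) : Int :=
  let cs := line.toList
  let pre := PySem.List.slice cs none (some ((cs.length : Int) - ((lstripSpTab cs).length : Int)))
  ((PySem.Chars.count pre [' '] : Int) + 4 * (PySem.Chars.count pre ['\t'] : Int))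

-- ===== PRECONDITION & SPEC =====
def Spec_calc_indent_depth_py (line : String) (out : Int) : Prop := out = calc_indent_depth_py_alt line
instance (line : String) (out : Int) : Decidable (Spec_calc_indent_depth_py line out) := by unfold Spec_calc_indent_depth_py; infer_instance

-- ===== CLAIM (what is proved, stated in full; the proofs are below) =====
def Claim_equal_calc_indent_depth_py : Prop := ∀ (line : String), Dom_calc_indent_depth_py line → Spec_calc_indent_depth_py line (calc_indent_depth_py line)

-- ===== LEMMAS AND PROOFS =====

theorem count_go_single (c : Char) (fuel : Nat) : ∀ (s : List Char) (acc : Nat), s.length ≤ fuel →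
    PySem.Chars.count.go [c] fuel s acc = acc + s.count c := by
  induction fuel with
  | zero =>
      intro s acc h
      have : s = [] := List.eq_nil_of_length_eq_zero (Nat.le_zero.mp h)
      subst this; simp [PySem.Chars.count.go]
  | succ n ih =>
      intro s acc h
      cases s with
      | nil => simp [PySem.Chars.count.go]
      | cons a t =>
          by_cases hc : c = a
          · subst hc
            simp [PySem.Chars.count.go, List.isPrefixOf]
            rw [ih t (acc + 1) (by simpa using h)]; omega
          · have hp : ([c].isPrefixOf (a :: t)) = false := by
              simp [List.isPrefixOf, hc]
            simp [PySem.Chars.count.go, hp, List.count_cons, ih t acc (by simpa using h)]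
            exact fun h' => hc h'.symm

theorem count_single (cs : List Char) (c : Char) :
    PySem.Chars.count cs [c] = cs.count c := by
  simp [PySem.Chars.count, count_go_single c cs.length cs 0 le_rfl]

theorem loop_eq (cs : List Char) (d : Int) :
    calcIndentLoop cs d =
      d + ((cs.takeWhile (fun c => c == ' ' || c == '\t')).count ' ' : Int)
        + 4 * ((cs.takeWhile (fun c => c == ' ' || c == '\t')).count '\t' : Int) := by
  induction cs generalizing d with
  | nil => simp [calcIndentLoop]
  | cons ch rest ih =>
      by_cases hs : ch = ' '
      · subst hs
        simp [calcIndentLoop, ih]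
        ring
      · by_cases ht : ch = '\t'
        · subst ht
          simp [calcIndentLoop, ih]
          ring
        · have h1 : (ch == ' ') = false := by simp [hs]
          have h2 : (ch == '\t') = false := by simp [ht]
          simp [calcIndentLoop, h1, h2, hs, ht]

theorem prefix_eq (cs : List Char) :
    PySem.List.slice cs none (some ((cs.length : Int) - ((lstripSpTab cs).length : Int)))
      = cs.takeWhile (fun c => c == ' ' || c == '\t') := by
  have hlen : (lstripSpTab cs).length ≤ cs.length := by
    simpa [lstripSpTab] using List.length_dropWhile_le (p := fun c => c == ' ' || c == '\t') (l := cs)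
  have hcast : ((cs.length : Int) - ((lstripSpTab cs).length : Int))
      = ((cs.length - (lstripSpTab cs).length : Nat) : Int) := by
    omega
  rw [hcast, PySem.List.slice_to_natCast]
  have htw : cs.length - (lstripSpTab cs).length
      = (cs.takeWhile (fun c => c == ' ' || c == '\t')).length := by
    have := List.takeWhile_append_dropWhile (p := fun c => c == ' ' || c == '\t') (l := cs)
    have hl : (cs.takeWhile (fun c => c == ' ' || c == '\t')).length
        + (cs.dropWhile (fun c => c == ' ' || c == '\t')).length = cs.length := by
      have h2 := congrArg List.length this
      rw [List.length_append] at h2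
      exact h2
    simp [lstripSpTab]; omega
  rw [htw]
  exact (List.prefix_iff_eq_take.mp (List.takeWhile_prefix _)).symm

-- ===== VERDICT (by name: the statement is the Claim_ definition above) =====
theorem calc_indent_depth_py_spec : Claim_equal_calc_indent_depth_py := by
  intro line _
  unfold Spec_calc_indent_depth_py calc_indent_depth_py calc_indent_depth_py_alt
  simp only [prefix_eq, count_single, loop_eq]
  ring
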